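-- pv_equiv track=rewrite | github.com/omertasgithub/data-structures-and-algorithms | leet code/Stack/1544. Make The String Great.py | makeGood3
-- ===== SOURCE A (Python) =====
-- def makeGood3(s):
--     stack = []
--     for c in s:
--         if stack and stack[-1] == c.swapcase():
--             stack.pop()
--         else:
--             stack.append(c)
--
--     return "".join(stack)
-- ===== SOURCE B (Python) =====
-- def makeGood3(s):
--     # Fixed-point reduction: repeatedly scan left-to-right removing adjacent
--     # pairs where the left char equals the right char's swapcase, until a
--     # full pass removes nothing.
--     while True:
--         out = []
--         removed = False
--         i = 0
--         n = len(s)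
--         while i < n:
--             if i + 1 < n and s[i] == s[i + 1].swapcase():
--                 i += 2
--                 removed = True
--             else:
--                 out.append(s[i])
--                 i += 1
--         if not removed:
--             return s
--         s = "".join(out)
-- ===== Notes on version B (the rewrite author's own statement) =====
-- stated objective: alternative
-- what changed: Replaced A's single stack-based pass (push each char, pop on a swapcase match with the stack top) by a stackless fixed-point reduction: repeated left-to-right passes that delete adjacent swapcase pairs, iterated until a pass removes nothing; the outputs agree because the deletion rule is confluent.
import Mathlib
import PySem

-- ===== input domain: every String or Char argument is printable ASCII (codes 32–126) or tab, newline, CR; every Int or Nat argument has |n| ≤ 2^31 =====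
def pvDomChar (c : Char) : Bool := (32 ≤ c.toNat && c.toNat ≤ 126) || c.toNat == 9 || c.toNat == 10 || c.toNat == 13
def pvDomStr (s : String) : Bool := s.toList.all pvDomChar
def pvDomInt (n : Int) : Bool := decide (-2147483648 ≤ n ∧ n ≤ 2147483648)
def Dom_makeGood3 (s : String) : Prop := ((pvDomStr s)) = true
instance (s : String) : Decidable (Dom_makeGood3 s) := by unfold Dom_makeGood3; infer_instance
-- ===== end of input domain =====

-- B replaces A's single stack pass by a fixed point of repeated pair-deleting scans
-- (alternative decomposition; same output because the deletion rule is confluent).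

-- shared primitive: Python's c.swapcase() for one char (exact on the ASCII domain)
def pvSwap (c : Char) : Char :=
  if PySem.Chars.isupper c then PySem.Chars.lowerChar c else PySem.Chars.upperChar c

-- ===== PORT A =====
-- one iteration of A's loop: pop if the stack top equals c.swapcase(), else append
def pvStep (stack : List Char) (c : Char) : List Char :=
  if stack ≠ [] ∧ stack.getLast? = some (pvSwap c) then stack.dropLast
  else stack ++ [c]

def makeGood3 (s : String) : String :=
  String.ofList (s.toList.foldl pvStep [])

-- ===== PORT B =====
-- one left-to-right pass of B: (characters kept, whether anything was removed)
def pvPassR : List Char → List Char × Bool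
  | a :: b :: t => if a = pvSwap b then ((pvPassR t).1, true)
                   else (a :: (pvPassR (b :: t)).1, (pvPassR (b :: t)).2)
  | l => (l, false)

-- needed by pvFix's decreasing_by: a removing pass shortens the list
theorem pvPassR_len : ∀ l : List Char,
    (pvPassR l).1.length ≤ l.length ∧ ((pvPassR l).2 = true → (pvPassR l).1.length < l.length) := by
  intro l
  induction l using pvPassR.induct with
  | case1 b t ih =>
    obtain ⟨ih1, ih2⟩ := ih
    have e1 : pvPassR (pvSwap b :: b :: t) = ((pvPassR t).1, true) := by simp [pvPassR]
    rw [e1]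
    simp only [List.length_cons]
    exact ⟨by omega, fun _ => by omega⟩
  | case2 a b t h ih =>
    obtain ⟨ih1, ih2⟩ := ih
    have e1 : pvPassR (a :: b :: t) = (a :: (pvPassR (b :: t)).1, (pvPassR (b :: t)).2) := by
      simp [pvPassR, h]
    rw [e1]
    simp only [List.length_cons] at ih1 ih2 ⊢
    exact ⟨by omega, fun hf => by have := ih2 hf; omega⟩
  | case3 l h =>
    cases l with
    | nil => simp [pvPassR]
    | cons x t => cases t with
      | nil => simp [pvPassR]
      | cons y u => exact absurd rfl (fun hh => h x y u hh)

def pvFix (l : List Char) : List Char :=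
  let p := pvPassR l
  if h : p.2 = true then pvFix p.1 else l
termination_by l.length
decreasing_by exact (pvPassR_len l).2 h

def makeGood3_alt (s : String) : String :=
  String.ofList (pvFix s.toList)

-- ===== PRECONDITION & SPEC =====
def Spec_makeGood3 (s : String) (out : String) : Prop := out = makeGood3_alt s
instance (s : String) (out : String) : Decidable (Spec_makeGood3 s out) := by unfold Spec_makeGood3; infer_instance

-- ===== CLAIM (what is proved, stated in full; the proofs are below) =====
def Claim_equal_makeGood3 : Prop := ∀ (s : String), Dom_makeGood3 s → Spec_makeGood3 s (makeGood3 s)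

-- ===== LEMMAS AND PROOFS =====

theorem isupper_iff (c : Char) : PySem.Chars.isupper c = true ↔ 65 ≤ c.toNat ∧ c.toNat ≤ 90 := by
  simp [PySem.Chars.isupper, Char.le_def, UInt32.le_iff_toNat_le, Char.toNat_val]

theorem islower_iff (c : Char) : PySem.Chars.islower c = true ↔ 97 ≤ c.toNat ∧ c.toNat ≤ 122 := by
  simp [PySem.Chars.islower, Char.le_def, UInt32.le_iff_toNat_le, Char.toNat_val]

-- swapcase is an involution on Char
theorem pvSwap_swap (c : Char) : pvSwap (pvSwap c) = c := by
  have valid : ∀ n : Nat, n < 0xd800 → (Char.ofNat n).toNat = n := by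
    intro n h; rw [Char.toNat_ofNat, if_pos (Or.inl h)]
  by_cases hu : PySem.Chars.isupper c = true
  · have h := (isupper_iff c).1 hu
    have hs1 : pvSwap c = PySem.Chars.lowerChar c := by rw [pvSwap, if_pos hu]
    have h1 : (PySem.Chars.lowerChar c).toNat = c.toNat + 32 := by
      rw [PySem.Chars.lowerChar, if_pos hu]; exact valid _ (by omega)
    have h2 : PySem.Chars.isupper (PySem.Chars.lowerChar c) = false := by
      rw [Bool.eq_false_iff]; intro hx; have := (isupper_iff _).1 hx; omega
    have h3 : PySem.Chars.islower (PySem.Chars.lowerChar c) = true :=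
      (islower_iff _).2 (by omega)
    rw [hs1, pvSwap, if_neg (by simp [h2]), PySem.Chars.upperChar, if_pos h3, h1]
    have he : c.toNat + 32 - 32 = c.toNat := by omega
    rw [he, Char.ofNat_toNat]
  · have hs1 : pvSwap c = PySem.Chars.upperChar c := by rw [pvSwap, if_neg (by simp [hu])]
    by_cases hl : PySem.Chars.islower c = true
    · have h := (islower_iff c).1 hl
      have h1 : (PySem.Chars.upperChar c).toNat = c.toNat - 32 := by
        rw [PySem.Chars.upperChar, if_pos hl]; exact valid _ (by omega)
      have h2 : PySem.Chars.isupper (PySem.Chars.upperChar c) = true :=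
        (isupper_iff _).2 (by omega)
      rw [hs1, pvSwap, if_pos h2, PySem.Chars.lowerChar, if_pos h2, h1]
      have he : c.toNat - 32 + 32 = c.toNat := by omega
      rw [he, Char.ofNat_toNat]
    · have hup : PySem.Chars.upperChar c = c := by
        rw [PySem.Chars.upperChar, if_neg (by simp [hl])]
      rw [hs1, hup, hs1, hup]

-- "reduced": no adjacent pair (x, y) with x = pvSwap y
def Red (l : List Char) : Prop := List.IsChain (fun x y => x ≠ pvSwap y) l

theorem pvStep_pair {st : List Char} {a b : Char} (hst : Red st) (hab : a = pvSwap b) :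
    pvStep (pvStep st a) b = st := by
  rcases List.eq_nil_or_concat st with rfl | ⟨ys, x, rfl⟩
  · simp [pvStep, hab]
  · simp only [List.concat_eq_append] at hst ⊢
    by_cases hx : x = pvSwap a
    · subst hx
      have hb : pvSwap a = b := by rw [hab, pvSwap_swap]
      have hstep1 : pvStep (ys ++ [pvSwap a]) a = ys := by
        rw [pvStep, if_pos ⟨by simp, by simp⟩, List.dropLast_concat]
      rw [hstep1]
      have hcond : ¬ (ys ≠ [] ∧ ys.getLast? = some (pvSwap b)) := by
        rintro ⟨hne, hlast⟩
        have hbd := (List.isChain_append.1 hst).2.2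
        have hrel := hbd (pvSwap b) (by simp [hlast]) (pvSwap a) (by simp)
        exact hrel (by rw [pvSwap_swap, hab])
      rw [pvStep, if_neg hcond, hb]
    · have hstep1 : pvStep (ys ++ [x]) a = (ys ++ [x]) ++ [a] := by
        rw [pvStep, if_neg]
        rintro ⟨_, hlast⟩
        rw [List.getLast?_concat] at hlast
        exact hx (by injection hlast)
      rw [hstep1, pvStep, if_pos ⟨by simp, by rw [List.getLast?_concat, hab]⟩,
          List.dropLast_concat]

theorem pvStep_red {st : List Char} (hst : Red st) (c : Char) : Red (pvStep st c) := by
  rw [pvStep]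
  split_ifs with h
  · exact List.IsChain.prefix hst (List.dropLast_prefix st)
  · refine List.isChain_append.2 ⟨hst, by simp, ?_⟩
    intro p hp q hq
    simp only [List.head?_cons, Option.mem_def, Option.some.injEq] at hq
    subst hq
    intro contra
    rw [Option.mem_def] at hp
    exact h ⟨fun hnil => by rw [hnil] at hp; simp at hp, by rw [hp, contra]⟩

theorem run_pass : ∀ l st, Red st →
    List.foldl pvStep st (pvPassR l).1 = List.foldl pvStep st l := by
  intro l
  induction l using pvPassR.induct with
  | case1 b t ih =>
    intro st hst
    have e1 : pvPassR (pvSwap b :: b :: t) = ((pvPassR t).1, true) := by simp [pvPassR]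
    rw [e1, ih st hst, List.foldl_cons, List.foldl_cons, pvStep_pair hst rfl]
  | case2 a b t h ih =>
    intro st hst
    have e1 : pvPassR (a :: b :: t) = (a :: (pvPassR (b :: t)).1, (pvPassR (b :: t)).2) := by
      simp [pvPassR, h]
    rw [e1, List.foldl_cons, List.foldl_cons]
    exact ih (pvStep st a) (pvStep_red hst a)
  | case3 l h =>
    intro st _
    cases l with
    | nil => rfl
    | cons x t => cases t with
      | nil => rfl
      | cons y u => exact absurd rfl (fun hh => h x y u hh)

theorem pass_false_red : ∀ l : List Char, (pvPassR l).2 = false → Red l := by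
  intro l
  induction l using pvPassR.induct with
  | case1 b t ih => intro hf; simp [pvPassR] at hf
  | case2 a b t h ih =>
    intro hf
    have e1 : pvPassR (a :: b :: t) = (a :: (pvPassR (b :: t)).1, (pvPassR (b :: t)).2) := by
      simp [pvPassR, h]
    rw [e1] at hf
    exact List.isChain_cons_cons.2 ⟨h, ih hf⟩
  | case3 l h =>
    intro _
    cases l with
    | nil => exact List.IsChain.nil
    | cons x t => cases t with
      | nil => exact List.IsChain.singleton _
      | cons y u => exact absurd rfl (fun hh => h x y u hh)

theorem run_reduced : ∀ (l st : List Char), Red (st ++ l) → List.foldl pvStep st l = st ++ l := by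
  intro l
  induction l with
  | nil => intro st _; simp
  | cons c t ih =>
    intro st hred
    have hstep : pvStep st c = st ++ [c] := by
      rw [pvStep, if_neg]
      rintro ⟨hne, hlast⟩
      have hbd := (List.isChain_append.1 hred).2.2
      exact hbd _ (by simp [hlast]) c (by simp) rfl
    rw [List.foldl_cons, hstep, ih (st ++ [c]) (by rw [List.append_assoc]; exact hred)]
    simp

theorem pvFix_eq (l : List Char) :
    pvFix l = if (pvPassR l).2 = true then pvFix (pvPassR l).1 else l := by
  rw [pvFix]
  split <;> rfl

theorem fix_eq_run : ∀ l : List Char, pvFix l = List.foldl pvStep [] l := by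
  intro l
  induction l using pvFix.induct with
  | case1 x p h ih =>
    rw [pvFix_eq, if_pos h, ih]
    exact run_pass x [] List.IsChain.nil
  | case2 x p h =>
    rw [pvFix_eq, if_neg h]
    have hred : Red x := pass_false_red x (by simpa using h)
    have hr := run_reduced x [] (by simpa using hred)
    simp at hr
    exact hr.symm

-- ===== VERDICT (by name: the statement is the Claim_ definition above) =====
theorem makeGood3_spec : Claim_equal_makeGood3 := by
  intro s _
  unfold Spec_makeGood3 makeGood3 makeGood3_alt
  rw [fix_eq_run]
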